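-- pv_equiv track=rewrite | github.com/amag1/ia-uncuyo-2023 | tp5-busqueda-local/code/utils.py | get_best_neighbor
-- ===== SOURCE A (Python) =====
-- def check_solution(solution):
--     r = 0
--     # Chequear cada fila
--     for i in range(len(solution)):
--         # Chequear cada columna
--         for j in range(i + 1, len(solution)):
--             # Si estan en la misma fila o en la misma diagonal
--             if solution[i] == solution[j] or abs(solution[i] - solution[j]) == j - i:
--                 r += 1
--
--     return r
--
-- def get_best_neighbor(neighbors):
--     bestNeighbor = neighbors[0]
--     bestCost = check_solution(bestNeighbor)
--     for neighbor in neighbors: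
--         cost = check_solution(neighbor)
--         if cost < bestCost:
--             bestNeighbor = neighbor
--             bestCost = cost
--     return bestNeighbor
-- ===== SOURCE B (Python) =====
-- def _cost(solution):
--     # O(n) conflict count: queens clash iff same value, same difference
--     # value-index, or same sum value+index; each bucket of k queens gives C(k,2).
--     rows = {}
--     diag = {}
--     anti = {}
--     for i, q in enumerate(solution):
--         rows[q] = rows.get(q, 0) + 1
--         diag[q - i] = diag.get(q - i, 0) + 1
--         anti[q + i] = anti.get(q + i, 0) + 1
--     total = 0
--     for tally in (rows, diag, anti):
--         for c in tally.values():
--             total += c * (c - 1) // 2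
--     return total
--
-- def get_best_neighbor(neighbors):
--     return min(neighbors, key=_cost)
-- ===== Notes on version B (the rewrite author's own statement) =====
-- stated objective: faster
-- what changed: A scores each candidate by testing all O(n^2) queen pairs; B tallies queens per row, per diagonal (q-i) and per anti-diagonal (q+i) in one pass and sums C(k,2) per bucket (O(n) per candidate), then picks the first minimum with min(key=...).
import Mathlib
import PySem

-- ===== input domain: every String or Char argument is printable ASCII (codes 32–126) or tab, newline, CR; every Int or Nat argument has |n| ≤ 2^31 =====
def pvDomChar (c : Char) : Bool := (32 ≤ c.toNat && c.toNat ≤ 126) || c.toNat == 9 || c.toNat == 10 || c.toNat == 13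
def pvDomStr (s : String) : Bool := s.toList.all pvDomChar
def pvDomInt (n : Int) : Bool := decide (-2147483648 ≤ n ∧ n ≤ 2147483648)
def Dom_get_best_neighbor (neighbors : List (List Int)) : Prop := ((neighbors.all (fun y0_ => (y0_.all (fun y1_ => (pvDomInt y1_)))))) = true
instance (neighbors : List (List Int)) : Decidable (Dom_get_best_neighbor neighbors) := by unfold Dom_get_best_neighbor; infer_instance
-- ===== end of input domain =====

-- B replaces A's all-pairs conflict test per candidate by row/diagonal/anti-diagonal
-- tallies summing C(k,2) per bucket, and takes the first cost-minimum via min(key=...).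

-- ===== PORT A =====
-- helper: check_solution — the all-pairs conflict count
def check_solution (solution : List Int) : Int :=
  (PySem.List.pyRange 0 (PySem.List.len solution) 1).foldl (fun r i =>
    (PySem.List.pyRange (i + 1) (PySem.List.len solution) 1).foldl (fun r j =>
      if (PySem.List.pyGetD solution i 0 == PySem.List.pyGetD solution j 0)
         || (((PySem.List.pyGetD solution i 0 - PySem.List.pyGetD solution j 0).natAbs : Int) == j - i)
      then r + 1 else r) r) 0

def get_best_neighbor (neighbors : List (List Int)) : List Int :=
  let bestNeighbor := PySem.List.pyGetD neighbors 0 []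
  let bestCost := check_solution bestNeighbor
  (neighbors.foldl (fun (st : List Int × Int) nb =>
      let cost := check_solution nb
      if cost < st.2 then (nb, cost) else st) (bestNeighbor, bestCost)).1

-- ===== PORT B =====
-- helper: C(c,2) as Python's c*(c-1)//2
def pvC2 (c : Int) : Int := PySem.Int.floordiv (c * (c - 1)) 2

-- helper: _cost — tally rows / diagonals / anti-diagonals, sum C(k,2) per bucket
def pvCost (solution : List Int) : Int :=
  let t := (PySem.List.enumerate solution 0).foldl
      (fun (t : PySem.Dict Int Int × PySem.Dict Int Int × PySem.Dict Int Int) p =>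
        (t.1.insert p.2 (t.1.getD p.2 0 + 1),
         t.2.1.insert (p.2 - p.1) (t.2.1.getD (p.2 - p.1) 0 + 1),
         t.2.2.insert (p.2 + p.1) (t.2.2.getD (p.2 + p.1) 0 + 1)))
      (PySem.Dict.empty, PySem.Dict.empty, PySem.Dict.empty)
  let total1 := t.1.values.foldl (fun a c => a + pvC2 c) 0
  let total2 := t.2.1.values.foldl (fun a c => a + pvC2 c) total1
  t.2.2.values.foldl (fun a c => a + pvC2 c) total2

def get_best_neighbor_alt (neighbors : List (List Int)) : List Int :=
  (PySem.List.min? neighbors pvCost).getD []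

-- ===== PRECONDITION & SPEC =====
-- Python A raises IndexError on the empty list (neighbors[0]); B's min() raises ValueError there too.
def Pre_get_best_neighbor (neighbors : List (List Int)) : Prop := neighbors ≠ []
instance (neighbors : List (List Int)) : Decidable (Pre_get_best_neighbor neighbors) := by unfold Pre_get_best_neighbor; infer_instance
def pvWitness_get_best_neighbor : List (List Int) := [[0, 2], [1, 3]]

def Spec_get_best_neighbor (neighbors : List (List Int)) (out : List Int) : Prop := out = get_best_neighbor_alt neighbors
instance (neighbors : List (List Int)) (out : List Int) : Decidable (Spec_get_best_neighbor neighbors out) := by unfold Spec_get_best_neighbor; infer_instance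

-- ===== CLAIM (what is proved, stated in full; the proofs are below) =====
def Claim_equal_get_best_neighbor : Prop := ∀ (neighbors : List (List Int)), Dom_get_best_neighbor neighbors → Pre_get_best_neighbor neighbors → Spec_get_best_neighbor neighbors (get_best_neighbor neighbors)

-- ===== LEMMAS AND PROOFS =====

-- the pair-conflict predicate on (index, value) pairs
def pvP (p q : Int × Int) : Bool :=
  (p.2 == q.2) || (((p.2 - q.2).natAbs : Int) == q.1 - p.1)

-- structural form of A's double loop: for each pair (earlier, later), count conflicts
def pvPairSum : List (Int × Int) → Int
  | [] => 0
  | p :: t => (t.countP (pvP p) : Int) + pvPairSum t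

-- number of equal (unordered) pairs in a list
def pvEqPairs : List Int → Int
  | [] => 0
  | x :: xs => (xs.count x : Int) + pvEqPairs xs

theorem pvC2_succ (c : Int) : pvC2 (c + 1) = pvC2 c + c := by
  unfold pvC2
  rw [PySem.Int.floordiv_eq_ediv_of_pos (by norm_num), PySem.Int.floordiv_eq_ediv_of_pos (by norm_num)]
  obtain ⟨k, hk⟩ := Int.even_mul_succ_self (c - 1)
  have h1 : (c + 1) * (c + 1 - 1) = (c - 1) * (c - 1 + 1) + 2 * c := by ring
  have h2 : c * (c - 1) = (c - 1) * (c - 1 + 1) := by ring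
  omega

theorem pvDiscard_of_not_mem (s : List Int) (x : Int) (hx : x ∉ s) :
    PySem.Set.discard s x = s := by
  simp only [PySem.Set.discard]
  apply List.filter_eq_self.mpr
  intro y hy
  have : y ≠ x := fun h => hx (h ▸ hy)
  simp [this]

theorem pvSum_map_extract (f : Int → Int) (x : Int) :
    ∀ (s : List Int), s.Nodup → x ∈ s →
      (s.map f).sum = f x + ((PySem.Set.discard s x).map f).sum := by
  intro s
  induction s with
  | nil => intro _ h; cases h
  | cons y t ih =>
    intro hnd hm
    rcases List.mem_cons.mp hm with h | h
    · subst h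
      have hxt : x ∉ t := (List.nodup_cons.mp hnd).1
      simp only [PySem.Set.discard, List.filter_cons]
      simp only [beq_self_eq_true, Bool.not_true]
      rw [show List.filter (fun y => !y == x) t = PySem.Set.discard t x from rfl,
          pvDiscard_of_not_mem t x hxt]
      simp
    · have hyx : y ≠ x := by
        rintro rfl; exact (List.nodup_cons.mp hnd).1 h
      simp only [PySem.Set.discard, List.filter_cons]
      rw [if_pos (by simp [hyx])]
      simp only [List.map_cons, List.sum_cons]
      rw [ih (List.nodup_cons.mp hnd).2 h]
      simp only [PySem.Set.discard]
      ring

theorem pvSumC2 : ∀ (ks : List Int),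
    ((PySem.Set.ofList ks).map (fun k => pvC2 ((ks.count k : Nat) : Int))).sum = pvEqPairs ks := by
  intro ks
  induction ks with
  | nil => rfl
  | cons x xs ih =>
    rw [PySem.Set.ofList_cons]
    simp only [List.map_cons, List.sum_cons, pvEqPairs]
    have hcx : ((x :: xs).count x : Int) = (xs.count x : Int) + 1 := by
      simp
    have hmap : (PySem.Set.discard (PySem.Set.ofList xs) x).map
          (fun k => pvC2 (((x :: xs).count k : Nat) : Int))
        = (PySem.Set.discard (PySem.Set.ofList xs) x).map
          (fun k => pvC2 ((xs.count k : Nat) : Int)) := by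
      apply List.map_congr_left
      intro k hk
      have hkx : k ≠ x := ((PySem.Set.mem_discard _ _ _).mp hk).2
      have hnx : ¬ (x = k) := fun h => hkx h.symm
      simp [hnx]
    rw [hmap, hcx, pvC2_succ]
    by_cases hx : x ∈ xs
    · have hmem : x ∈ PySem.Set.ofList xs := by
        rw [PySem.Set.mem_ofList]; exact hx
      have hex := pvSum_map_extract (fun k => pvC2 ((xs.count k : Nat) : Int)) x
        (PySem.Set.ofList xs) (PySem.Set.nodup_ofList xs) hmem
      have hb : ((fun k => pvC2 ((xs.count k : Nat) : Int)) x) = pvC2 ((xs.count x : Nat) : Int) := rfl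
      rw [hb] at hex
      omega
    · have hcnt : xs.count x = 0 := List.count_eq_zero.mpr hx
      rw [pvDiscard_of_not_mem _ _ (fun h => hx ((PySem.Set.mem_ofList _ _).mp h))]
      rw [ih]
      have h0 : pvC2 (((0 : Nat) : Int)) = 0 := by decide
      simp only [hcnt] at *
      omega

-- pointwise split of the conflict test into the three bucket tests (for a pair in order)
theorem pvCountP3 (p : Int × Int) : ∀ (t : List (Int × Int)), (∀ q ∈ t, p.1 < q.1) →
    t.countP (pvP p)
      = t.countP (fun q => q.2 == p.2)
        + t.countP (fun q => q.2 - q.1 == p.2 - p.1)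
        + t.countP (fun q => q.2 + q.1 == p.2 + p.1) := by
  intro t
  induction t with
  | nil => intro _; rfl
  | cons q t ih =>
    intro h
    have hq : p.1 < q.1 := h q (by simp)
    have ht := ih (fun r hr => h r (by simp [hr]))
    simp only [List.countP_cons]
    rw [ht]
    have : (if pvP p q then 1 else 0)
        = (if (q.2 == p.2) = true then 1 else 0)
          + (if (q.2 - q.1 == p.2 - p.1) = true then 1 else 0)
          + (if (q.2 + q.1 == p.2 + p.1) = true then 1 else 0) := by
      simp only [pvP, Bool.or_eq_true, beq_iff_eq]
      split_ifs <;> omega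
    omega

theorem pvPairSum_split : ∀ (t : List (Int × Int)), t.Pairwise (fun p q => p.1 < q.1) →
    pvPairSum t = pvEqPairs (t.map (·.2))
      + pvEqPairs (t.map (fun q => q.2 - q.1))
      + pvEqPairs (t.map (fun q => q.2 + q.1)) := by
  intro t
  induction t with
  | nil => intro _; rfl
  | cons p t ih =>
    intro hp
    obtain ⟨h1, h2⟩ := List.pairwise_cons.mp hp
    simp only [pvPairSum, List.map_cons, pvEqPairs]
    rw [ih h2, pvCountP3 p t h1]
    have c1 : (t.map (·.2)).count p.2 = t.countP (fun q => q.2 == p.2) := by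
      simp [List.count, List.countP_map, Function.comp_def]
    have c2 : (t.map (fun q => q.2 - q.1)).count (p.2 - p.1)
        = t.countP (fun q => q.2 - q.1 == p.2 - p.1) := by
      simp [List.count, List.countP_map, Function.comp_def]
    have c3 : (t.map (fun q => q.2 + q.1)).count (p.2 + p.1)
        = t.countP (fun q => q.2 + q.1 == p.2 + p.1) := by
      simp [List.count, List.countP_map, Function.comp_def]
    rw [c1, c2, c3]
    push_cast
    ring

-- A's double index loop over pyRange equals the structural pair sum of the mapped range
theorem pvSumRange (h : Int → Int × Int) :
    ∀ (k : Nat) (a b : Int), (b - a).toNat = k →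
    ((PySem.List.pyRange a b 1).map
        (fun i => (((PySem.List.pyRange (i + 1) b 1).countP (fun j => pvP (h i) (h j))) : Int))).sum
      = pvPairSum ((PySem.List.pyRange a b 1).map h) := by
  intro k
  induction k with
  | zero =>
    intro a b hab
    rw [PySem.List.pyRange_one_eq_nil (by omega)]
    rfl
  | succ n ih =>
    intro a b hab
    rw [PySem.List.pyRange_one_cons (by omega)]
    simp only [List.map_cons, List.sum_cons, pvPairSum]
    rw [ih (a + 1) b (by omega)]
    congr 1
    rw [List.countP_map]
    rfl

theorem check_eq_pairSum (sol : List Int) :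
    check_solution sol = pvPairSum (PySem.List.enumerate sol 0) := by
  unfold check_solution
  rw [PySem.List.foldl_congr_mem (PySem.List.pyRange 0 (PySem.List.len sol) 1)
      (fun r i =>
        (PySem.List.pyRange (i + 1) (PySem.List.len sol) 1).foldl (fun r j =>
          if (PySem.List.pyGetD sol i 0 == PySem.List.pyGetD sol j 0)
             || (((PySem.List.pyGetD sol i 0 - PySem.List.pyGetD sol j 0).natAbs : Int) == j - i)
          then r + 1 else r) r)
      (fun r i => r + (((PySem.List.pyRange (i + 1) (PySem.List.len sol) 1).countP
        (fun j => pvP (i, PySem.List.pyGetD sol i 0) (j, PySem.List.pyGetD sol j 0))) : Int))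
      0
      (fun acc x _ => by beta_reduce; rw [PySem.List.foldl_if_add_one]; rfl)]
  rw [PySem.List.foldl_add]
  rw [PySem.List.enumerate_eq_map_pyRange sol 0]
  rw [← pvSumRange (fun j => (j, PySem.List.pyGetD sol j 0)) (PySem.List.len sol - 0).toNat 0 (PySem.List.len sol) rfl]
  simp

theorem pvCost_eq (sol : List Int) :
    pvCost sol
      = pvEqPairs ((PySem.List.enumerate sol 0).map (·.2))
        + pvEqPairs ((PySem.List.enumerate sol 0).map (fun q => q.2 - q.1))
        + pvEqPairs ((PySem.List.enumerate sol 0).map (fun q => q.2 + q.1)) := by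
  have key : ∀ (f : Int × Int → Int),
      (PySem.List.enumerate sol 0).foldl
        (fun (d : PySem.Dict Int Int) p => d.insert (f p) (d.getD (f p) 0 + 1)) PySem.Dict.empty
      = PySem.Dict.counter ((PySem.List.enumerate sol 0).map f) := by
    intro f
    rw [← PySem.Dict.foldl_insert_getD_add_one_eq_counter, List.foldl_map]
  have vals : ∀ (ks : List Int) (acc : Int),
      (PySem.Dict.counter ks).values.foldl (fun a c => a + pvC2 c) acc
      = acc + pvEqPairs ks := by
    intro ks acc
    rw [PySem.List.foldl_add]
    have hv : (PySem.Dict.counter ks).values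
        = (PySem.Set.ofList ks).map (fun k => ((ks.count k : Nat) : Int)) := by
      show ((PySem.Dict.counter ks).items).map (·.2) = _
      rw [PySem.Dict.items_counter, List.map_map]
      rfl
    rw [hv, List.map_map]
    rw [show ((fun c => pvC2 c) ∘ fun k => ((ks.count k : Nat) : Int))
        = fun k => pvC2 ((ks.count k : Nat) : Int) from rfl]
    rw [pvSumC2]
  simp only [pvCost]
  rw [PySem.List.foldl_prod_mk
    (f := fun (d : PySem.Dict Int Int) (p : Int × Int) => d.insert p.2 (d.getD p.2 0 + 1))
    (g := fun (t : PySem.Dict Int Int × PySem.Dict Int Int) (p : Int × Int) =>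
      (t.1.insert (p.2 - p.1) (t.1.getD (p.2 - p.1) 0 + 1),
       t.2.insert (p.2 + p.1) (t.2.getD (p.2 + p.1) 0 + 1)))]
  rw [PySem.List.foldl_prod_mk
    (f := fun (d : PySem.Dict Int Int) (p : Int × Int) => d.insert (p.2 - p.1) (d.getD (p.2 - p.1) 0 + 1))
    (g := fun (d : PySem.Dict Int Int) (p : Int × Int) => d.insert (p.2 + p.1) (d.getD (p.2 + p.1) 0 + 1))]
  simp only [key (fun p => p.2), key (fun p => p.2 - p.1), key (fun p => p.2 + p.1), vals]
  ring

theorem cost_agree (sol : List Int) : check_solution sol = pvCost sol := by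
  rw [check_eq_pairSum, pvCost_eq]
  exact pvPairSum_split (PySem.List.enumerate sol 0) (PySem.List.pairwise_lt_enumerate sol 0)

-- B's min? on a cons absorbs one comparison step (first minimum kept)
theorem pvMinStep (x y : List Int) (t : List (List Int)) :
    PySem.List.min? (x :: y :: t) pvCost
    = PySem.List.min? ((if pvCost y < pvCost x then y else x) :: t) pvCost := by
  simp only [PySem.List.min?, List.foldl_cons]
  split <;> rfl

-- A's selection loop equals B's min? (both keep the first cost-minimum)
theorem pvSel : ∀ (t : List (List Int)) (b : List Int),
    (t.foldl (fun (st : List Int × Int) nb =>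
        let cost := check_solution nb
        if cost < st.2 then (nb, cost) else st) (b, check_solution b)).1
    = (PySem.List.min? (b :: t) pvCost).getD [] := by
  intro t
  induction t with
  | nil => intro b; rfl
  | cons y t ih =>
    intro b
    rw [pvMinStep]
    simp only [List.foldl_cons]
    by_cases h : pvCost y < pvCost b
    · rw [if_pos (show check_solution y < check_solution b by
          rw [cost_agree, cost_agree]; exact h), if_pos h]
      exact ih y
    · rw [if_neg (show ¬ check_solution y < check_solution b by
          rw [cost_agree, cost_agree]; exact h), if_neg h]
      exact ih b

-- ===== VERDICT (by name: the statement is the Claim_ definition above) =====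
theorem get_best_neighbor_spec : Claim_equal_get_best_neighbor := by
  intro neighbors _ hpre
  unfold Spec_get_best_neighbor get_best_neighbor get_best_neighbor_alt
  obtain ⟨x, t, rfl⟩ := List.exists_cons_of_ne_nil hpre
  have h0 : PySem.List.pyGetD (x :: t) 0 [] = x := by
    simp [PySem.List.pyGetD, PySem.List.pyGet?, PySem.List.pyIdx?]
  simp only [h0, List.foldl_cons]
  rw [if_neg (lt_irrefl _)]
  exact pvSel t x
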